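-- pv_equiv track=rewrite | github.com/sksmslhy/Java_Lexical_and_Syntax_Analyzer | main.py | checkDoubleQuote
-- ===== SOURCE A (Python) =====
-- def checkDoubleQuote(string_list: list):
--     result = []
--     temp = []
--     checkOn = False
--     for i in string_list:
--         if i == '"':
--             if checkOn == True:
--                 temp.append('"')
--                 result.append(''.join(temp))
--                 temp = []
--                 checkOn = False
--             elif checkOn == False:
--                 checkOn = True
--                 temp.append('"')
--         else:
--             if checkOn == False:
--                 result.append(i)
--             elif checkOn == True:
--                 temp.append(i)
--     return result
-- ===== SOURCE B (Python) =====
-- def checkDoubleQuote(string_list: list):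
--     result = []
--     i = 0
--     n = len(string_list)
--     while i < n:
--         if string_list[i] != '"':
--             result.append(string_list[i])
--             i += 1
--         else:
--             try:
--                 j = string_list.index('"', i + 1)
--             except ValueError:
--                 break
--             result.append(''.join(string_list[i:j + 1]))
--             i = j + 1
--     return result
-- ===== Notes on version B (the rewrite author's own statement) =====
-- stated objective: alternative
-- what changed: Replaces A's flag-and-buffer state machine (checkOn/temp accumulated element by element) with an index-based while loop that, on each opening quote, scans ahead with list.index for the matching closing quote and joins the whole slice at once, breaking out when no closing quote exists.
import Mathlib
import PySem

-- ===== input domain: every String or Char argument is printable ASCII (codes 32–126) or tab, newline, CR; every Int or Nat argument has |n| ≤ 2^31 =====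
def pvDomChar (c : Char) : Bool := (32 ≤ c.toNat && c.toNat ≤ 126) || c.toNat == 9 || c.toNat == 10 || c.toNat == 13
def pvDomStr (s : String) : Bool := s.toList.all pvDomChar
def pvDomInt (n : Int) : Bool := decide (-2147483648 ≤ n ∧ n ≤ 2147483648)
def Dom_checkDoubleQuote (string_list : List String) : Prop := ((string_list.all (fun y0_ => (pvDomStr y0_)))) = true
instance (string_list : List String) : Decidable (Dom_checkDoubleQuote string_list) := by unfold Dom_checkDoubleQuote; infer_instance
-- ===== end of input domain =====

-- B replaces A's flag-and-buffer state machine with an index/look-ahead scan that joins each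
-- quoted slice at once (objective: alternative decomposition; same O(n) cost).

-- ===== PORT A =====
-- state = (result, temp, checkOn), folded over the list exactly as A's for-loop
def checkDoubleQuoteStep (st : List String × List String × Bool) (i : String) :
    List String × List String × Bool :=
  let result := st.1
  let temp := st.2.1
  let checkOn := st.2.2
  if i = "\"" then
    if checkOn then (result ++ [PySem.Str.join "" (temp ++ ["\""])], [], false)
    else (result, temp ++ ["\""], true)
  else
    if checkOn then (result, temp ++ [i], true)
    else (result ++ [i], temp, checkOn)

def checkDoubleQuote (string_list : List String) : List String :=
  (string_list.foldl checkDoubleQuoteStep ([], [], false)).1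

-- ===== PORT B =====
-- look-ahead: find the closing quote, returning the segment before it and the rest after it
-- (ports Source B's `string_list.index('"', i+1)` together with the slice `string_list[i:j+1]`)
def findCloseQuote : List String → Option (List String × List String)
  | [] => none
  | s :: rest =>
    if s = "\"" then some ([], rest)
    else
      match findCloseQuote rest with
      | none => none
      | some (a, b) => some (s :: a, b)

theorem findCloseQuote_length {l a b : List String} (h : findCloseQuote l = some (a, b)) :
    b.length < l.length := by
  induction l generalizing a b with
  | nil => simp [findCloseQuote] at h
  | cons s rest ih =>
    by_cases hs : s = "\""
    · rw [findCloseQuote, if_pos hs] at h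
      simp only [Option.some.injEq, Prod.mk.injEq] at h
      obtain ⟨-, h2⟩ := h
      subst h2
      simp
    · rw [findCloseQuote, if_neg hs] at h
      cases hf : findCloseQuote rest with
      | none => rw [hf] at h; cases h
      | some p =>
        obtain ⟨a', b'⟩ := p
        rw [hf] at h
        simp only [Option.some.injEq, Prod.mk.injEq] at h
        obtain ⟨-, h2⟩ := h
        subst h2
        exact Nat.lt_succ_of_lt (ih hf)

def checkDoubleQuote_alt : List String → List String
  | [] => []
  | s :: rest =>
    if s = "\"" then
      match hf : findCloseQuote rest with
      | none => []
      | some (seg, rest') =>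
        PySem.Str.join "" ("\"" :: (seg ++ ["\""])) :: checkDoubleQuote_alt rest'
    else s :: checkDoubleQuote_alt rest
termination_by l => l.length
decreasing_by
  · exact Nat.lt_succ_of_lt (findCloseQuote_length hf)
  · simp

-- ===== PRECONDITION & SPEC =====
def Spec_checkDoubleQuote (string_list : List String) (out : List String) : Prop := out = checkDoubleQuote_alt string_list
instance (string_list : List String) (out : List String) : Decidable (Spec_checkDoubleQuote string_list out) := by unfold Spec_checkDoubleQuote; infer_instance

-- ===== CLAIM (what is proved, stated in full; the proofs are below) =====
def Claim_equal_checkDoubleQuote : Prop := ∀ (string_list : List String), Dom_checkDoubleQuote string_list → Spec_checkDoubleQuote string_list (checkDoubleQuote string_list)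

-- ===== LEMMAS AND PROOFS =====
-- equation lemmas for checkDoubleQuote_alt (its dependent match resists direct simp)
theorem alt_nonquote {s : String} {rest : List String} (hs : ¬ s = "\"") :
    checkDoubleQuote_alt (s :: rest) = s :: checkDoubleQuote_alt rest := by
  rw [checkDoubleQuote_alt, if_neg hs]

theorem alt_quote_none {rest : List String} (hf : findCloseQuote rest = none) :
    checkDoubleQuote_alt ("\"" :: rest) = [] := by
  rw [checkDoubleQuote_alt, if_pos rfl]
  split
  · rfl
  · next seg rest' hf' => rw [hf] at hf'; cases hf'

theorem alt_quote_some {rest seg rest' : List String}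
    (hf : findCloseQuote rest = some (seg, rest')) :
    checkDoubleQuote_alt ("\"" :: rest) =
      PySem.Str.join "" ("\"" :: (seg ++ ["\""])) :: checkDoubleQuote_alt rest' := by
  rw [checkDoubleQuote_alt, if_pos rfl]
  split
  · next hf' => rw [hf] at hf'; cases hf'
  · next seg2 rest2 hf' =>
      rw [hf] at hf'
      simp only [Option.some.injEq, Prod.mk.injEq] at hf'
      obtain ⟨h1, h2⟩ := hf'
      subst h1; subst h2
      rfl

-- main invariant, both loop modes at once:
-- off-mode: the fold from (res, temp, false) yields res ++ checkDoubleQuote_alt l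
-- on-mode:  the fold from (res, temp, true) yields res ++ (joined segment :: tail), or res if unclosed
theorem checkDoubleQuote_fold (l : List String) :
    (∀ res, (l.foldl checkDoubleQuoteStep (res, [], false)).1 = res ++ checkDoubleQuote_alt l)
    ∧ (∀ res temp, (l.foldl checkDoubleQuoteStep (res, temp, true)).1 =
        res ++ (match findCloseQuote l with
                | none => []
                | some (seg, rest) =>
                  PySem.Str.join "" (temp ++ (seg ++ ["\""])) :: checkDoubleQuote_alt rest)) := by
  induction l with
  | nil => simp [checkDoubleQuote_alt, findCloseQuote]
  | cons s rest ih =>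
    constructor
    · intro res
      by_cases hs : s = "\""
      · subst hs
        have hstep : checkDoubleQuoteStep (res, [], false) "\"" = (res, ["\""], true) := by
          simp [checkDoubleQuoteStep]
        rw [List.foldl_cons, hstep, ih.2]
        cases hf : findCloseQuote rest with
        | none => simp [alt_quote_none hf]
        | some p =>
          obtain ⟨seg, rest'⟩ := p
          simp [alt_quote_some hf]
      · have hstep : checkDoubleQuoteStep (res, [], false) s = (res ++ [s], [], false) := by
          simp [checkDoubleQuoteStep, hs]
        rw [List.foldl_cons, hstep, ih.1, alt_nonquote hs]
        simp
    · intro res temp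
      by_cases hs : s = "\""
      · subst hs
        have hstep : checkDoubleQuoteStep (res, temp, true) "\"" =
            (res ++ [PySem.Str.join "" (temp ++ ["\""])], [], false) := by
          simp [checkDoubleQuoteStep]
        rw [List.foldl_cons, hstep, ih.1]
        simp [findCloseQuote]
      · have hstep : checkDoubleQuoteStep (res, temp, true) s = (res, temp ++ [s], true) := by
          simp [checkDoubleQuoteStep, hs]
        rw [List.foldl_cons, hstep, ih.2]
        rw [findCloseQuote, if_neg hs]
        cases hf : findCloseQuote rest with
        | none => simp
        | some p =>
          obtain ⟨seg, rest'⟩ := p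
          simp

-- ===== VERDICT (by name: the statement is the Claim_ definition above) =====
theorem checkDoubleQuote_spec : Claim_equal_checkDoubleQuote := by
  intro l _
  unfold Spec_checkDoubleQuote checkDoubleQuote
  simpa using (checkDoubleQuote_fold l).1 []
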